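-- pv_equiv track=rewrite | github.com/josephmccrae-utsa/TIP101 | Unit 2/S1 Problem Sets/Problem Set 1/p4_keys_v_values.py | keys_v_values
-- ===== SOURCE A (Python) =====
-- def keys_v_values(dictionary):
--     sumKeys = 0
--     sumValues = 0
--
--     for key in dictionary.keys():
--         sumKeys += key
--     for value in dictionary.values():
--         sumValues += value
--
--     if sumKeys > sumValues:
--         return "keys"
--     elif sumKeys < sumValues:
--         return "values"
--     elif sumKeys == sumValues:
--         return "balanced"
-- ===== SOURCE B (Python) =====
-- def keys_v_values(dictionary):
--     def balance(items):
--         # divide-and-conquer: net key-over-value balance of a slice of items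
--         if len(items) == 0:
--             return 0
--         if len(items) == 1:
--             k, v = items[0]
--             return k - v
--         mid = len(items) // 2
--         return balance(items[:mid]) + balance(items[mid:])
--
--     d = balance(list(dictionary.items()))
--     if d > 0:
--         return "keys"
--     if d < 0:
--         return "values"
--     return "balanced"
-- ===== Notes on version B (the rewrite author's own statement) =====
-- stated objective: alternative
-- what changed: Replaces the two linear summation loops over keys() and values() with a recursive divide-and-conquer over items(): the list is split in halves, each half's net key-over-value balance is computed recursively and the two balances are added, and the sign of the root balance picks the answer.
import Mathlib
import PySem

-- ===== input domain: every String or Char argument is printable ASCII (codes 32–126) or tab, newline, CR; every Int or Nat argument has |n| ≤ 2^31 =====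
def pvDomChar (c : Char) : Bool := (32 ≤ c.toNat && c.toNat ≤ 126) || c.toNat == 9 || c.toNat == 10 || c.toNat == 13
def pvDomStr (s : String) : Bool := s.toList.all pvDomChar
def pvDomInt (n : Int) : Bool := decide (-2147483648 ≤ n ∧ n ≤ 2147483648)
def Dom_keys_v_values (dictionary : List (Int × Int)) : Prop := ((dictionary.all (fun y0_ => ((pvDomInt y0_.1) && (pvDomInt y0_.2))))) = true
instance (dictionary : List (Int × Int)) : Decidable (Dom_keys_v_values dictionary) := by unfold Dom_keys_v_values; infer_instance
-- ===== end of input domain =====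

-- B computes the answer by recursive divide-and-conquer on items (halving, combining net balances) instead of A's two linear summation loops.


-- ===== PORT A =====
def keys_v_values (dictionary : List (Int × Int)) : String :=
  let sumKeys : Int := dictionary.foldl (fun acc kv => acc + kv.1) 0
  let sumValues : Int := dictionary.foldl (fun acc kv => acc + kv.2) 0
  if sumKeys > sumValues then "keys"
  else if sumKeys < sumValues then "values"
  else "balanced"

-- ===== PORT B =====
-- divide-and-conquer: net key-over-value balance of the item list (mirrors Source B's `balance`)
def pvBalance (items : List (Int × Int)) : Int :=
  if items.length = 0 then 0
  else if items.length = 1 then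
    let kv := items.headI
    kv.1 - kv.2
  else
    let mid := items.length / 2
    pvBalance (items.take mid) + pvBalance (items.drop mid)
termination_by items.length
decreasing_by
  · simp [List.length_take]; omega
  · simp [List.length_drop]; omega

def keys_v_values_alt (dictionary : List (Int × Int)) : String :=
  let d := pvBalance dictionary
  if d > 0 then "keys"
  else if d < 0 then "values"
  else "balanced"

-- ===== PRECONDITION & SPEC =====
def Spec_keys_v_values (dictionary : List (Int × Int)) (out : String) : Prop := out = keys_v_values_alt dictionary
instance (dictionary : List (Int × Int)) (out : String) : Decidable (Spec_keys_v_values dictionary out) := by unfold Spec_keys_v_values; infer_instance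

-- ===== CLAIM (what is proved, stated in full; the proofs are below) =====
def Claim_equal_keys_v_values : Prop := ∀ (dictionary : List (Int × Int)), Dom_keys_v_values dictionary → Spec_keys_v_values dictionary (keys_v_values dictionary)

-- ===== LEMMAS AND PROOFS =====
theorem pvBalance_eq_sum (l : List (Int × Int)) :
    pvBalance l = (l.map (fun kv => kv.1 - kv.2)).sum := by
  fun_induction pvBalance l with
  | case1 l h => simp [List.length_eq_zero_iff.mp h]
  | case2 l h1 h2 =>
      obtain ⟨kv, rfl⟩ := List.length_eq_one_iff.mp h2
      show kv.1 - kv.2 = _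
      simp
  | case3 l h1 h2 mid ih1 ih2 =>
      rw [ih1, ih2, ← List.sum_append, ← List.map_append, List.take_append_drop]

theorem pv_foldl_add (f : Int × Int → Int) (l : List (Int × Int)) : ∀ (a : Int),
    l.foldl (fun acc kv => acc + f kv) a = a + (l.map f).sum := by
  induction l with
  | nil => simp
  | cons kv t ih => intro a; simp [List.foldl, ih]; ring

theorem pv_sum_sub (l : List (Int × Int)) :
    (l.map (fun kv => kv.1 - kv.2)).sum
      = (l.map (fun kv => kv.1)).sum - (l.map (fun kv => kv.2)).sum := by
  induction l with
  | nil => simp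
  | cons kv t ih => simp only [List.map_cons, List.sum_cons, ih]; ring

-- ===== VERDICT (by name: the statement is the Claim_ definition above) =====
theorem keys_v_values_spec : Claim_equal_keys_v_values := by
  intro d _
  unfold Spec_keys_v_values keys_v_values keys_v_values_alt
  simp only [pvBalance_eq_sum, pv_foldl_add, zero_add]
  rw [pv_sum_sub]
  generalize (d.map (fun kv => kv.1)).sum = K
  generalize (d.map (fun kv => kv.2)).sum = V
  split_ifs <;> first | rfl | omega
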